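-- pv_equiv track=rewrite | github.com/AsmaaMohamed16/Chinese-chicker | beta.py | dont_stop_in_house
-- ===== SOURCE A (Python) =====
-- def dont_stop_in_house(valid_moves, invalid_homes_array):
--
--     moves_to_remove = []
--
--     for valid_move in valid_moves:
--
--         end_move = valid_move[1]
--
--         if end_move in invalid_homes_array:
--             moves_to_remove.append(valid_move)
--
--     new_valid_moves = [i for i in valid_moves + moves_to_remove if i not in valid_moves or i not in moves_to_remove]
--
--     return new_valid_moves
-- ===== SOURCE B (Python) =====
-- def dont_stop_in_house(valid_moves, invalid_homes_array):
--     return [valid_move for valid_move in valid_moves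
--             if valid_move[1] not in invalid_homes_array]
-- ===== Notes on version B (the rewrite author's own statement) =====
-- stated objective: simpler
-- what changed: Replaced A's two-phase build-a-removal-list-then-symmetric-difference (filter over valid_moves + moves_to_remove with two membership tests) by a single-pass comprehension that keeps each move whose endpoint is not an invalid home.
import Mathlib
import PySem

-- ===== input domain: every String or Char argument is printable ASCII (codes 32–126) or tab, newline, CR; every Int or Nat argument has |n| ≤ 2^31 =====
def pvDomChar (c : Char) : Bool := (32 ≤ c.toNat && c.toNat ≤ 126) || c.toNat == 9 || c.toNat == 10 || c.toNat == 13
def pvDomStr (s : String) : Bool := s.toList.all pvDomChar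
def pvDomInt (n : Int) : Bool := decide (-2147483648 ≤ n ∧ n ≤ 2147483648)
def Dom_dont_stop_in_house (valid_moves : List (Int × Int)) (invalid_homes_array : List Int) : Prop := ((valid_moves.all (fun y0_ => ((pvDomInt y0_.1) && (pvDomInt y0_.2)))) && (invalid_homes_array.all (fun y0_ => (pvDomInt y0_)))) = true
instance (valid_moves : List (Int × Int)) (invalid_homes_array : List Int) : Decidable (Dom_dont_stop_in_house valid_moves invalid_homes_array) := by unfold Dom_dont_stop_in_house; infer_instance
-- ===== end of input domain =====

-- B replaces A's build-removal-list-then-symmetric-difference with one direct filter pass (simpler).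

-- ===== PORT A =====
def dont_stop_in_house (valid_moves : List (Int × Int)) (invalid_homes_array : List Int) : List (Int × Int) :=
  let moves_to_remove :=
    valid_moves.foldl (fun acc valid_move =>
      let end_move := valid_move.2
      if end_move ∈ invalid_homes_array then acc ++ [valid_move] else acc) []
  let new_valid_moves :=
    (valid_moves ++ moves_to_remove).filter
      (fun i => decide (i ∉ valid_moves) || decide (i ∉ moves_to_remove))
  new_valid_moves

-- ===== PORT B =====
def dont_stop_in_house_alt (valid_moves : List (Int × Int)) (invalid_homes_array : List Int) : List (Int × Int) :=
  valid_moves.filter (fun valid_move => decide (valid_move.2 ∉ invalid_homes_array))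

-- ===== PRECONDITION & SPEC =====
def Spec_dont_stop_in_house (valid_moves : List (Int × Int)) (invalid_homes_array : List Int) (out : List (Int × Int)) : Prop := out = dont_stop_in_house_alt valid_moves invalid_homes_array
instance (valid_moves : List (Int × Int)) (invalid_homes_array : List Int) (out : List (Int × Int)) : Decidable (Spec_dont_stop_in_house valid_moves invalid_homes_array out) := by unfold Spec_dont_stop_in_house; infer_instance

-- ===== CLAIM (what is proved, stated in full; the proofs are below) =====
def Claim_equal_dont_stop_in_house : Prop := ∀ (valid_moves : List (Int × Int)) (invalid_homes_array : List Int), Dom_dont_stop_in_house valid_moves invalid_homes_array → Spec_dont_stop_in_house valid_moves invalid_homes_array (dont_stop_in_house valid_moves invalid_homes_array)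

-- ===== LEMMAS AND PROOFS =====

-- A's moves_to_remove loop is exactly a filter of valid_moves.
theorem mtr_eq (valid_moves : List (Int × Int)) (invalid_homes_array : List Int) :
    valid_moves.foldl (fun acc valid_move =>
      let end_move := valid_move.2
      if end_move ∈ invalid_homes_array then acc ++ [valid_move] else acc) []
    = valid_moves.filter (fun m => decide (m.2 ∈ invalid_homes_array)) := by
  simpa using PySem.List.foldl_append_ite_eq_filter
    (p := fun m : Int × Int => m.2 ∈ invalid_homes_array) (l := valid_moves) (acc := [])

-- ===== VERDICT (by name: the statement is the Claim_ definition above) =====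
theorem dont_stop_in_house_spec : Claim_equal_dont_stop_in_house := by
  intro vm inv _
  show _ = _
  unfold dont_stop_in_house dont_stop_in_house_alt
  simp only [mtr_eq, List.filter_append]
  have h2 : (vm.filter (fun m => decide (m.2 ∈ inv))).filter
      (fun i => decide (i ∉ vm) ||
        decide (i ∉ vm.filter (fun m => decide (m.2 ∈ inv)))) = [] := by
    apply List.filter_eq_nil_iff.mpr
    intro i hi
    have hvm : i ∈ vm := List.mem_of_mem_filter hi
    simp [hvm, hi]
  rw [h2, List.append_nil]
  apply List.filter_congr
  intro i hi
  simp [hi, List.mem_filter]
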